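-- pv_equiv track=rewrite | github.com/pypi-data/pypi-mirror-372 | packages/python-observabilityclient/python_observabilityclient-1.2.0.tar.gz/python_observabilityclient-1.2.0/observabilityclient/utils/metric_utils.py | format_labels
-- ===== SOURCE A (Python) =====
-- def format_labels(d: dict) -> str:
--     def replace_doubled_quotes(string):
--         if "''" in string:
--             string = string.replace("''", "'")
--         if '""' in string:
--             string = string.replace('""', '"')
--         return string
--
--     ret = ""
--     for key, value in d.items():
--         ret += "{}='{}', ".format(key, value)
--     ret = ret[0:-2]
--     old = ""
--     while ret != old:
--         old = ret
--         ret = replace_doubled_quotes(ret)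
--     return ret
-- ===== SOURCE B (Python) =====
-- def format_labels(d: dict) -> str:
--     s = "".join("{}='{}', ".format(k, v) for k, v in d.items())[:-2]
--     out = []
--     for c in s:
--         if out and c == out[-1] and c in "'\"":
--             continue
--         out.append(c)
--     return "".join(out)
-- ===== Notes on version B (the rewrite author's own statement) =====
-- stated objective: alternative
-- what changed: A concatenates pair by pair and then repeatedly rescans the whole string with str.replace until a fixpoint collapses doubled quotes; B joins once and collapses every run of identical quote characters in a single left-to-right scan.
import Mathlib
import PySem

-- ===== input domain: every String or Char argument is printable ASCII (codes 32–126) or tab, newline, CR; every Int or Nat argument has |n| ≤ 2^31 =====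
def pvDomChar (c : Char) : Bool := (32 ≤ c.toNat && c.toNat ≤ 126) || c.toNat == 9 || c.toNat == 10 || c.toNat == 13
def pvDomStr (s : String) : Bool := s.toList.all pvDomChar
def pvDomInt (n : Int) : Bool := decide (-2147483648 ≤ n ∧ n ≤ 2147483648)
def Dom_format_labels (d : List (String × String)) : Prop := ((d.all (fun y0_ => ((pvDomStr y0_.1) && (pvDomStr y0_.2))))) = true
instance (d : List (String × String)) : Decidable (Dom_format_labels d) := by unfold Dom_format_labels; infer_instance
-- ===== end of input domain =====

-- B replaces A's repeated whole-string replace passes by one left-to-right scan that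
-- collapses each run of identical quote characters; objective: alternative algorithm.

-- ===== PORT A =====
-- One pass of string.replace("''","'") (resp. '""' → '"'): collapses each pair of
-- adjacent q's to one, left to right.  Used only to prove termination of A's while
-- loop (the port itself calls PySem.Chars.replace, see replace_eq_rep2 below).
def rep2 (q : Char) : List Char → List Char
  | a :: b :: t => if a = q ∧ b = q then q :: rep2 q t else a :: rep2 q (b :: t)
  | l => l

theorem rep2_cons2 (q a b : Char) (t : List Char) :
    rep2 q (a :: b :: t) = if a = q ∧ b = q then q :: rep2 q t else a :: rep2 q (b :: t) := rfl

theorem rep2_short (q : Char) (l : List Char)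
    (h : ∀ (a b : Char) (t : List Char), l = a :: b :: t → False) : rep2 q l = l := by
  rcases l with _ | ⟨a, _ | ⟨b, t⟩⟩
  · rfl
  · rfl
  · exact (h a b t rfl).elim

theorem rep2_length_le (q : Char) (l : List Char) : (rep2 q l).length ≤ l.length := by
  induction l using rep2.induct q with
  | case1 a b t hab ih =>
      rw [rep2_cons2, if_pos hab]
      simp only [List.length_cons]
      omega
  | case2 a b t hab ih =>
      rw [rep2_cons2, if_neg hab]
      simp only [List.length_cons] at *
      omega
  | case3 l h => rw [rep2_short q l h]

theorem rep2_eq_or_lt (q : Char) (l : List Char) :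
    rep2 q l = l ∨ (rep2 q l).length < l.length := by
  induction l using rep2.induct q with
  | case1 a b t hab ih =>
      right
      have := rep2_length_le q t
      rw [rep2_cons2, if_pos hab]
      simp only [List.length_cons]
      omega
  | case2 a b t hab ih =>
      rw [rep2_cons2, if_neg hab]
      rcases ih with h1 | h1
      · left; rw [h1]
      · right
        simp only [List.length_cons] at h1 ⊢
        omega
  | case3 l h => left; exact rep2_short q l h

-- Chars.replace with pattern [q,q] → [q] IS rep2 q
theorem replace_go_eq_rep2 (q : Char) :
    ∀ (fuel : Nat) (l acc : List Char), l.length ≤ fuel →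
      PySem.Chars.replace.go [q, q] [q] fuel l acc = acc.reverse ++ rep2 q l := by
  intro fuel
  induction fuel with
  | zero =>
      intro l acc hl
      have : l = [] := List.eq_nil_of_length_eq_zero (Nat.le_zero.mp hl)
      subst this; simp [PySem.Chars.replace.go, rep2]
  | succ n ih =>
      intro l acc hl
      match l with
      | [] => simp [PySem.Chars.replace.go, rep2]
      | c :: t =>
          rw [PySem.Chars.replace.go]
          by_cases hp : List.isPrefixOf [q, q] (c :: t) = true
          · rw [if_pos hp]
            match t, hp with
            | b :: t', hp =>
                have hcb : c = q ∧ b = q := by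
                  simp [List.isPrefixOf] at hp
                  exact ⟨hp.1.symm, hp.2.symm⟩
                have ht' : t'.length ≤ n := by simp at hl; omega
                rw [show List.drop (List.length [q, q]) (c :: b :: t') = t' by simp]
                rw [ih t' ([q].reverse ++ acc) ht']
                rw [rep2_cons2, if_pos hcb]
                simp
            | [], hp => simp [List.isPrefixOf] at hp
          · rw [if_neg hp]
            have ht : t.length ≤ n := by simp at hl; omega
            rw [ih t (c :: acc) ht]
            match t with
            | [] => simp [rep2]
            | b :: t' =>
                have hnot : ¬ (c = q ∧ b = q) := by
                  intro h'
                  obtain ⟨h1, h2⟩ := h'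
                  subst h1; subst h2
                  simp [List.isPrefixOf] at hp
                rw [rep2_cons2, if_neg hnot]
                simp

theorem replace_eq_rep2 (q : Char) (l : List Char) :
    PySem.Chars.replace l [q, q] [q] = rep2 q l := by
  rw [PySem.Chars.replace]
  simp only [List.isEmpty_cons, Bool.false_eq_true, if_false]
  exact replace_go_eq_rep2 q l.length l [] (le_refl _)

-- if [q,q] does not occur in l, rep2 q leaves l unchanged
theorem rep2_id_of_not_infix (q : Char) (l : List Char) (h : ¬ [q, q] <:+: l) :
    rep2 q l = l := by
  induction l using rep2.induct q with
  | case1 a b t hab ih =>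
      obtain ⟨ha, hb⟩ := hab; subst ha; subst hb
      exact (h ⟨[], t, by simp⟩).elim
  | case2 a b t hab ih =>
      rw [rep2_cons2, if_neg hab, ih]
      intro hin
      exact h (hin.trans (List.suffix_cons a (b :: t)).isInfix)
  | case3 l h' => exact rep2_short q l h'

-- the body of A's replace_doubled_quotes, transliterated (guards and all)
def replaceDoubledQuotes (s : List Char) : List Char :=
  let s1 := if PySem.Chars.isIn ['\'', '\''] s then PySem.Chars.replace s ['\'', '\''] ['\''] else s
  if PySem.Chars.isIn ['"', '"'] s1 then PySem.Chars.replace s1 ['"', '"'] ['"'] else s1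

theorem replaceDoubledQuotes_eq (s : List Char) :
    replaceDoubledQuotes s = rep2 '"' (rep2 '\'' s) := by
  unfold replaceDoubledQuotes
  have h1 : (if PySem.Chars.isIn ['\'', '\''] s then PySem.Chars.replace s ['\'', '\''] ['\''] else s)
      = rep2 '\'' s := by
    by_cases h : PySem.Chars.isIn ['\'', '\''] s = true
    · rw [if_pos h, replace_eq_rep2]
    · rw [if_neg h, rep2_id_of_not_infix '\'' s]
      exact (PySem.Chars.isIn_eq_false_iff _ _).mp (Bool.eq_false_iff.mpr h)
  rw [h1]
  by_cases h : PySem.Chars.isIn ['"', '"'] (rep2 '\'' s) = true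
  · rw [if_pos h, replace_eq_rep2]
  · rw [if_neg h, rep2_id_of_not_infix '"' _]
    exact (PySem.Chars.isIn_eq_false_iff _ _).mp (Bool.eq_false_iff.mpr h)

theorem replaceDoubledQuotes_lt_of_ne (s : List Char) (h : replaceDoubledQuotes s ≠ s) :
    (replaceDoubledQuotes s).length < s.length := by
  rw [replaceDoubledQuotes_eq] at h ⊢
  rcases rep2_eq_or_lt '\'' s with h1 | h1
  · rw [h1] at h ⊢
    rcases rep2_eq_or_lt '"' s with h2 | h2
    · exact absurd h2 h
    · exact h2
  · exact lt_of_le_of_lt (rep2_length_le _ _) h1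

-- A's while loop: apply replace_doubled_quotes until the string stops changing
def loopA (s : List Char) : List Char :=
  if h : replaceDoubledQuotes s = s then s else loopA (replaceDoubledQuotes s)
termination_by s.length
decreasing_by exact replaceDoubledQuotes_lt_of_ne s h

def format_labels (d : List (String × String)) : String :=
  -- ret = ""; for key, value in d.items(): ret += "{}='{}', ".format(key, value)
  let ret := d.foldl
    (fun ret kv => ret ++ (kv.1.toList ++ ['=', '\''] ++ kv.2.toList ++ ['\'', ',', ' ']))
    ([] : List Char)
  -- ret = ret[0:-2]
  let ret2 := PySem.Chars.slice ret (some 0) (some (-2))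
  -- old = ""; while ret != old: old = ret; ret = replace_doubled_quotes(ret)
  String.ofList (loopA ret2)

-- ===== PORT B =====
-- Source B's loop body; out is kept reversed (head = last appended char)
def collapseStep (acc : List Char) (c : Char) : List Char :=
  match acc with
  | [] => [c]
  | p :: _ => if c = p ∧ (c = '\'' ∨ c = '"') then acc else c :: acc

def format_labels_alt (d : List (String × String)) : String :=
  -- s = "".join("{}='{}', ".format(k, v) for k, v in d.items())[:-2]
  let s := PySem.Chars.slice
    (d.flatMap (fun kv => kv.1.toList ++ ['=', '\''] ++ kv.2.toList ++ ['\'', ',', ' ']))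
    (some 0) (some (-2))
  -- out = []; for c in s: skip a repeated quote char; out.append(c); "".join(out)
  String.ofList ((s.foldl collapseStep []).reverse)

-- ===== PRECONDITION & SPEC =====
def Spec_format_labels (d : List (String × String)) (out : String) : Prop := out = format_labels_alt d
instance (d : List (String × String)) (out : String) : Decidable (Spec_format_labels d out) := by unfold Spec_format_labels; infer_instance

-- ===== CLAIM (what is proved, stated in full; the proofs are below) =====
def Claim_equal_format_labels : Prop := ∀ (d : List (String × String)), Dom_format_labels d → Spec_format_labels d (format_labels d)

-- ===== LEMMAS AND PROOFS =====

-- forward form of B's scan: prev = the last emitted char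
def canonGo (prev : Option Char) : List Char → List Char
  | [] => []
  | c :: t => if prev = some c ∧ (c = '\'' ∨ c = '"') then canonGo prev t else c :: canonGo (some c) t

theorem canonGo_cons (prev : Option Char) (c : Char) (t : List Char) :
    canonGo prev (c :: t) =
      if prev = some c ∧ (c = '\'' ∨ c = '"') then canonGo prev t else c :: canonGo (some c) t := rfl

theorem collapseStep_cons (p c : Char) (r : List Char) :
    collapseStep (p :: r) c = if c = p ∧ (c = '\'' ∨ c = '"') then p :: r else c :: p :: r := rfl

theorem foldl_collapseStep_eq_canonGo (l : List Char) :
    ∀ acc : List Char, (l.foldl collapseStep acc).reverse = acc.reverse ++ canonGo acc.head? l := by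
  induction l with
  | nil => intro acc; simp [canonGo]
  | cons c t ih =>
      intro acc
      rw [List.foldl_cons, ih]
      rcases acc with _ | ⟨p, r⟩
      · simp [collapseStep, canonGo_cons]
      · by_cases h : c = p ∧ (c = '\'' ∨ c = '"')
        · rw [collapseStep_cons, if_pos h]
          simp only [List.head?_cons]
          rw [canonGo_cons, if_pos ⟨congrArg some h.1.symm, h.2⟩]
        · have h' : ¬ ((some p = some c) ∧ (c = '\'' ∨ c = '"')) := by
            rintro ⟨h1, h2⟩
            exact h ⟨(Option.some_injective _ h1).symm, h2⟩
          rw [collapseStep_cons, if_neg h]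
          simp only [List.head?_cons]
          rw [canonGo_cons, if_neg h']
          simp

-- collapsing one replace pass first does not change the scan's output
theorem canonGo_rep2 (q : Char) (hq : q = '\'' ∨ q = '"') (l : List Char) :
    ∀ prev, canonGo prev (rep2 q l) = canonGo prev l := by
  induction l using rep2.induct q with
  | case1 a b t hab ih =>
      intro prev
      obtain ⟨ha, hb⟩ := hab
      rw [rep2_cons2, if_pos ⟨ha, hb⟩, ha, hb]
      by_cases hp : prev = some q
      · subst hp
        rw [canonGo_cons, if_pos ⟨rfl, hq⟩, ih (some q),
            canonGo_cons, if_pos ⟨rfl, hq⟩, canonGo_cons, if_pos ⟨rfl, hq⟩]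
      · rw [canonGo_cons, if_neg (by rintro ⟨h1, _⟩; exact hp h1),
            ih (some q),
            canonGo_cons (prev := prev), if_neg (by rintro ⟨h1, _⟩; exact hp h1),
            canonGo_cons, if_pos ⟨rfl, hq⟩]
  | case2 a b t hab ih =>
      intro prev
      rw [rep2_cons2, if_neg hab]
      by_cases hp : prev = some a ∧ (a = '\'' ∨ a = '"')
      · rw [canonGo_cons, if_pos hp, canonGo_cons, if_pos hp]
        exact ih prev
      · rw [canonGo_cons, if_neg hp, canonGo_cons, if_neg hp]
        rw [ih (some a)]
  | case3 l h => intro prev; rw [rep2_short q l h]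

-- no two adjacent equal quote chars (the fixpoint shape of A's loop)
def nodbl : List Char → Prop
  | a :: b :: t => ¬ (a = b ∧ (a = '\'' ∨ a = '"')) ∧ nodbl (b :: t)
  | _ => True

theorem nodbl_of_not_infix (l : List Char) :
    ¬ ['\'', '\''] <:+: l → ¬ ['"', '"'] <:+: l → nodbl l := by
  induction l with
  | nil => intro _ _; trivial
  | cons a t ih =>
      intro h1 h2
      rcases t with _ | ⟨b, t'⟩
      · trivial
      · refine ⟨?_, ih (fun h => h1 (h.trans (List.suffix_cons a _).isInfix))
                      (fun h => h2 (h.trans (List.suffix_cons a _).isInfix))⟩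
        rintro ⟨hab, hq⟩
        subst hab
        rcases hq with hq | hq <;> subst hq
        · exact h1 ⟨[], t', by simp⟩
        · exact h2 ⟨[], t', by simp⟩

theorem canonGo_some_of_nodbl (l : List Char) :
    ∀ c, nodbl (c :: l) → canonGo (some c) l = l := by
  induction l with
  | nil => intro c _; rfl
  | cons b t ih =>
      intro c h
      obtain ⟨hcb, ht⟩ := h
      have h' : ¬ ((some c = some b) ∧ (b = '\'' ∨ b = '"')) := by
        rintro ⟨h1, h2⟩
        have h3 := Option.some_injective _ h1
        exact hcb ⟨h3, by rw [h3]; exact h2⟩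
      rw [canonGo_cons, if_neg h', ih b ht]

theorem canonGo_none_of_nodbl (l : List Char) (h : nodbl l) : canonGo none l = l := by
  rcases l with _ | ⟨c, t⟩
  · rfl
  · rw [canonGo_cons, if_neg (by rintro ⟨h1, _⟩; simp at h1),
        canonGo_some_of_nodbl t c h]

theorem rep2_infix_lt (q : Char) (l : List Char) (h : [q, q] <:+: l) :
    (rep2 q l).length < l.length := by
  induction l using rep2.induct q with
  | case1 a b t hab ih =>
      have := rep2_length_le q t
      rw [rep2_cons2, if_pos hab]
      simp only [List.length_cons]
      omega
  | case2 a b t hab ih =>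
      rw [rep2_cons2, if_neg hab]
      simp only [List.length_cons]
      have hbt : [q, q] <:+: b :: t := by
        rcases (List.infix_cons_iff).mp h with h' | h'
        · exfalso
          rcases h' with ⟨s, hs⟩
          simp at hs
          exact hab ⟨hs.1.symm, hs.2.1.symm⟩
        · exact h'
      have h2 := ih hbt
      simp only [List.length_cons] at h2 ⊢
      omega
  | case3 l hl =>
      exfalso
      rcases l with _ | ⟨a, _ | ⟨b, t⟩⟩
      · have h2 := h.length_le; simp at h2
      · have h2 := h.length_le; simp at h2
      · exact hl a b t rfl

theorem not_infix_of_rep2_eq (q : Char) (l : List Char) (h : rep2 q l = l) :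
    ¬ [q, q] <:+: l := by
  intro hin
  have h1 := rep2_infix_lt q l hin
  rw [h] at h1
  omega

-- the main loop computes exactly B's single scan
theorem loopA_eq_canonGo (l : List Char) : loopA l = canonGo none l := by
  induction l using loopA.induct with
  | case1 s ht =>
      rw [loopA]
      rw [dif_pos ht]
      rw [replaceDoubledQuotes_eq] at ht
      have h1 : rep2 '\'' s = s := by
        rcases rep2_eq_or_lt '\'' s with h | h
        · exact h
        · exfalso
          have h2 := rep2_length_le '"' (rep2 '\'' s)
          have h3 := congrArg List.length ht
          omega
      rw [h1] at ht
      rw [canonGo_none_of_nodbl s (nodbl_of_not_infix s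
        (not_infix_of_rep2_eq _ _ h1) (not_infix_of_rep2_eq _ _ ht))]
  | case2 s ht ih =>
      rw [loopA]
      rw [dif_neg ht]
      rw [ih]
      show canonGo none (replaceDoubledQuotes s) = canonGo none s
      rw [replaceDoubledQuotes_eq,
          canonGo_rep2 '"' (Or.inr rfl) _ none,
          canonGo_rep2 '\'' (Or.inl rfl) _ none]

-- ===== VERDICT (by name: the statement is the Claim_ definition above) =====
theorem format_labels_spec : Claim_equal_format_labels := by
  intro d _
  unfold Spec_format_labels format_labels format_labels_alt
  rw [PySem.List.foldl_append_eq_flatMap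
    (fun kv : String × String => kv.1.toList ++ ['=', '\''] ++ kv.2.toList ++ ['\'', ',', ' '])]
  simp only [List.nil_append]
  rw [loopA_eq_canonGo, foldl_collapseStep_eq_canonGo]
  rfl
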